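-- pv_equiv track=rewrite | github.com/ryandakine/football_betting_system | travel_and_rest_analyzer.py | estimate_destination_timezone
-- ===== SOURCE A (Python) =====
-- def estimate_destination_timezone(city: str) -> str:
--     """Estimate timezone based on city name."""
--     city_lower = city.lower()
--
--     if any(
--         west in city_lower
--         for west in [
--             "seattle",
--             "portland",
--             "san francisco",
--             "los angeles",
--             "san diego",
--             "oakland",
--         ]
--     ):
--         return "PT"
--     elif any(
--         mountain in city_lower for mountain in ["denver", "phoenix", "salt lake"]
--     ):
--         return "MT"
--     elif any(
--         central in city_lower
--         for central in [
--             "chicago",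
--             "houston",
--             "dallas",
--             "kansas city",
--             "milwaukee",
--             "minneapolis",
--         ]
--     ):
--         return "CT"
--     else:
--         return "ET"  # Default to Eastern
-- ===== SOURCE B (Python) =====
-- # Different algorithm: one left-to-right scan over the lowercased string, keeping a
-- # best-priority-rank accumulator updated at each position via startswith, instead of
-- # four keyword-group substring-membership branches.
-- _PRIORITY = ("PT", "MT", "CT", "ET")
-- _KEYWORD_RANK = {
--     "seattle": 0, "portland": 0, "san francisco": 0, "los angeles": 0,
--     "san diego": 0, "oakland": 0,
--     "denver": 1, "phoenix": 1, "salt lake": 1,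
--     "chicago": 2, "houston": 2, "dallas": 2,
--     "kansas city": 2, "milwaukee": 2, "minneapolis": 2,
-- }
--
--
-- def estimate_destination_timezone(city: str) -> str:
--     """Estimate timezone based on city name."""
--     best = 3
--     suffix = city.lower()
--     while suffix:
--         for keyword, rank in _KEYWORD_RANK.items():
--             if rank < best and suffix.startswith(keyword):
--                 best = rank
--         suffix = suffix[1:]
--     return _PRIORITY[best]
-- ===== Notes on version B (the rewrite author's own statement) =====
-- stated objective: alternative
-- what changed: Replaces the four keyword-group any()-substring branches with a single left-to-right scan of the lowercased string that keeps a best-priority-rank accumulator, updating it with startswith checks at every position and indexing a priority table at the end.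
import Mathlib
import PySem

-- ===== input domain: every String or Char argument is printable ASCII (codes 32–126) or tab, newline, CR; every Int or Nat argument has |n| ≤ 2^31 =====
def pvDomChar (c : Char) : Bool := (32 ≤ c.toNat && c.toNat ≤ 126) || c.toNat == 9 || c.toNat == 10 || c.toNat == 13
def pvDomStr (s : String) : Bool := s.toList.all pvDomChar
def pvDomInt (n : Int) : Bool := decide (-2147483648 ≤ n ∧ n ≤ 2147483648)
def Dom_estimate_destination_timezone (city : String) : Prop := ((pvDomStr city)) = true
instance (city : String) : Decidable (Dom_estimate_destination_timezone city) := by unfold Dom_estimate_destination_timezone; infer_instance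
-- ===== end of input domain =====

-- B replaces A's four any()-substring branches with one positional scan keeping a best-rank accumulator ('alternative').

-- ===== PORT A =====
def estimate_destination_timezone (city : String) : String :=
  let city_lower := PySem.Str.lower city
  if ([ "seattle", "portland", "san francisco", "los angeles", "san diego", "oakland"
      ].any (fun west => PySem.Str.isIn west city_lower)) then
    "PT"
  else if (["denver", "phoenix", "salt lake"].any (fun mountain => PySem.Str.isIn mountain city_lower)) then
    "MT"
  else if (["chicago", "houston", "dallas", "kansas city", "milwaukee", "minneapolis"
      ].any (fun central => PySem.Str.isIn central city_lower)) then
    "CT"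
  else
    "ET"

-- ===== PORT B =====
-- _KEYWORD_RANK.items() in insertion order
def kwRank : List (String × Nat) :=
  [ ("seattle", 0), ("portland", 0), ("san francisco", 0), ("los angeles", 0),
    ("san diego", 0), ("oakland", 0),
    ("denver", 1), ("phoenix", 1), ("salt lake", 1),
    ("chicago", 2), ("houston", 2), ("dallas", 2),
    ("kansas city", 2), ("milwaukee", 2), ("minneapolis", 2) ]

-- inner 'for keyword, rank in _KEYWORD_RANK.items(): if rank < best and suffix.startswith(keyword): best = rank'
def tzInner (suffix : List Char) (best : Nat) : Nat :=
  kwRank.foldl (fun b p => if p.2 < b && PySem.Chars.startswith suffix p.1.toList then p.2 else b) best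

-- 'while suffix: …; suffix = suffix[1:]' (strings as their char lists)
def tzLoop (suffix : List Char) (best : Nat) : Nat :=
  match suffix with
  | [] => best
  | c :: rest => tzLoop rest (tzInner (c :: rest) best)

def estimate_destination_timezone_alt (city : String) : String :=
  let best := tzLoop (PySem.Str.lower city).toList 3
  -- _PRIORITY[best]; best ≤ 3 always holds, so the default is never used
  ["PT", "MT", "CT", "ET"].getD best "ET"

-- ===== PRECONDITION & SPEC =====
def Spec_estimate_destination_timezone (city : String) (out : String) : Prop := out = estimate_destination_timezone_alt city
instance (city : String) (out : String) : Decidable (Spec_estimate_destination_timezone city out) := by unfold Spec_estimate_destination_timezone; infer_instance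

-- ===== CLAIM (what is proved, stated in full; the proofs are below) =====
def Claim_equal_estimate_destination_timezone : Prop := ∀ (city : String), Dom_estimate_destination_timezone city → Spec_estimate_destination_timezone city (estimate_destination_timezone city)

-- ===== LEMMAS AND PROOFS =====

theorem tzInner_le (suffix : List Char) : ∀ (L : List (String × Nat)) (b : Nat),
    L.foldl (fun b p => if p.2 < b && PySem.Chars.startswith suffix p.1.toList then p.2 else b) b ≤ b := by
  intro L
  induction L with
  | nil => intro b; exact le_refl b
  | cons q L ih =>
    intro b
    simp only [List.foldl_cons]
    refine le_trans (ih _) ?_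
    by_cases h : (q.2 < b && PySem.Chars.startswith suffix q.1.toList) = true
    · rw [if_pos h]
      simp only [Bool.and_eq_true, decide_eq_true_eq] at h
      omega
    · rw [if_neg h]

theorem tzInner_le_of (suffix : List Char) (p : String × Nat) :
    ∀ (L : List (String × Nat)) (b : Nat), p ∈ L →
    PySem.Chars.startswith suffix p.1.toList = true →
    L.foldl (fun b p => if p.2 < b && PySem.Chars.startswith suffix p.1.toList then p.2 else b) b ≤ p.2 := by
  intro L
  induction L with
  | nil => intro b h; exact absurd h (List.not_mem_nil)
  | cons q L ih =>
    intro b hmem hsw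
    simp only [List.foldl_cons]
    rcases List.mem_cons.mp hmem with heq | hmem'
    · subst heq
      refine le_trans (tzInner_le suffix L _) ?_
      by_cases h : (p.2 < b && PySem.Chars.startswith suffix p.1.toList) = true
      · rw [if_pos h]
      · rw [if_neg h]
        simp only [Bool.and_eq_true, decide_eq_true_eq, hsw, and_true] at h
        omega
    · exact ih _ hmem' hsw

theorem tzInner_ge (suffix : List Char) (r : Nat) :
    ∀ (L : List (String × Nat)) (b : Nat), r ≤ b →
    (∀ p ∈ L, PySem.Chars.startswith suffix p.1.toList = true → r ≤ p.2) →
    r ≤ L.foldl (fun b p => if p.2 < b && PySem.Chars.startswith suffix p.1.toList then p.2 else b) b := by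
  intro L
  induction L with
  | nil => intro b hb _; exact hb
  | cons q L ih =>
    intro b hb H
    simp only [List.foldl_cons]
    refine ih _ ?_ (fun p hp => H p (List.mem_cons_of_mem _ hp))
    by_cases h : (q.2 < b && PySem.Chars.startswith suffix q.1.toList) = true
    · rw [if_pos h]
      simp only [Bool.and_eq_true, decide_eq_true_eq] at h
      exact H q (List.mem_cons_self) h.2
    · rw [if_neg h]; exact hb

theorem tzLoop_le (s : List Char) : ∀ (b : Nat), tzLoop s b ≤ b := by
  induction s with
  | nil => intro b; exact le_refl b
  | cons c rest ih =>
    intro b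
    exact le_trans (ih _) (tzInner_le (c :: rest) kwRank b)

theorem tzLoop_le_of (s t : List Char) (p : String × Nat)
    (hp : p ∈ kwRank) (hsw : PySem.Chars.startswith t p.1.toList = true) (htne : t ≠ []) :
    ∀ (b : Nat), t <:+ s → tzLoop s b ≤ p.2 := by
  induction s with
  | nil =>
    intro b hsuf
    exact absurd (List.suffix_nil.mp hsuf) htne
  | cons c rest ih =>
    intro b hsuf
    rcases List.suffix_cons_iff.mp hsuf with heq | hsuf'
    · subst heq
      simp only [tzLoop]
      exact le_trans (tzLoop_le rest _) (tzInner_le_of (c :: rest) p kwRank b hp hsw)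
    · exact ih _ hsuf'

theorem tzLoop_ge (s : List Char) (r : Nat) :
    ∀ (b : Nat), r ≤ b →
    (∀ t, t <:+ s → ∀ p ∈ kwRank, PySem.Chars.startswith t p.1.toList = true → r ≤ p.2) →
    r ≤ tzLoop s b := by
  induction s with
  | nil => intro b hb _; exact hb
  | cons c rest ih =>
    intro b hb H
    refine ih _ (tzInner_ge (c :: rest) r kwRank b hb (H (c :: rest) List.suffix_rfl))
      (fun t ht => H t (ht.trans (List.suffix_cons c rest)))

-- a keyword occurring as a substring gives an upper bound on the scan's result
theorem tzLoop_le_of_isIn (cl : List Char) (p : String × Nat)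
    (hp : p ∈ kwRank) (hne : p.1.toList ≠ [])
    (hin : PySem.Chars.isIn p.1.toList cl = true) (b : Nat) :
    tzLoop cl b ≤ p.2 := by
  rcases List.infix_iff_prefix_suffix.mp ((PySem.Chars.isIn_iff_infix _ _).mp hin) with ⟨t, hpre, hsuf⟩
  have htne : t ≠ [] := by
    intro h; subst h; exact hne (List.prefix_nil.mp hpre)
  exact tzLoop_le_of cl t p hp ((PySem.Chars.startswith_iff _ _).mpr hpre) htne b hsuf

-- keywords of rank below r that occur nowhere give a lower bound on the scan's result
theorem tzLoop_ge_of_notIn (cl : List Char) (r : Nat) (hr : r ≤ 3)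
    (H : ∀ p ∈ kwRank, p.2 < r → PySem.Chars.isIn p.1.toList cl = false) :
    r ≤ tzLoop cl 3 := by
  refine tzLoop_ge cl r 3 hr ?_
  intro t ht p hp hsw
  by_cases hlt : p.2 < r
  · exfalso
    have hin : PySem.Chars.isIn p.1.toList cl = true := by
      refine (PySem.Chars.isIn_iff_infix _ _).mpr ?_
      exact List.infix_iff_prefix_suffix.mpr ⟨t, (PySem.Chars.startswith_iff _ _).mp hsw, ht⟩
    rw [H p hp hlt] at hin
    exact Bool.false_ne_true hin
  · omega

-- ===== VERDICT (by name: the statement is the Claim_ definition above) =====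
theorem estimate_destination_timezone_spec : Claim_equal_estimate_destination_timezone := by
  intro city _
  unfold Spec_estimate_destination_timezone estimate_destination_timezone
    estimate_destination_timezone_alt
  dsimp only
  set cl := (PySem.Str.lower city).toList with hcl
  split_ifs with h1 h2 h3
  · -- PT: some rank-0 keyword occurs
    simp only [List.any_cons, List.any_nil, Bool.or_eq_true, Bool.or_false,
      PySem.Str.isIn_eq] at h1
    have hb : tzLoop cl 3 ≤ 0 := by
      rcases h1 with h | h | h | h | h | h
      · exact tzLoop_le_of_isIn cl ("seattle", 0) (by simp [kwRank]) (by decide) h 3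
      · exact tzLoop_le_of_isIn cl ("portland", 0) (by simp [kwRank]) (by decide) h 3
      · exact tzLoop_le_of_isIn cl ("san francisco", 0) (by simp [kwRank]) (by decide) h 3
      · exact tzLoop_le_of_isIn cl ("los angeles", 0) (by simp [kwRank]) (by decide) h 3
      · exact tzLoop_le_of_isIn cl ("san diego", 0) (by simp [kwRank]) (by decide) h 3
      · exact tzLoop_le_of_isIn cl ("oakland", 0) (by simp [kwRank]) (by decide) h 3
    have : tzLoop cl 3 = 0 := Nat.le_zero.mp hb
    rw [this]; rfl
  · -- MT
    simp only [List.any_cons, List.any_nil, Bool.or_eq_true, Bool.or_false,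
      PySem.Str.isIn_eq] at h1 h2
    simp only [not_or] at h1
    have hub : tzLoop cl 3 ≤ 1 := by
      rcases h2 with h | h | h
      · exact tzLoop_le_of_isIn cl ("denver", 1) (by simp [kwRank]) (by decide) h 3
      · exact tzLoop_le_of_isIn cl ("phoenix", 1) (by simp [kwRank]) (by decide) h 3
      · exact tzLoop_le_of_isIn cl ("salt lake", 1) (by simp [kwRank]) (by decide) h 3
    have hlb : 1 ≤ tzLoop cl 3 := by
      refine tzLoop_ge_of_notIn cl 1 (by omega) ?_
      intro p hp hlt
      fin_cases hp <;> simp_all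
    have : tzLoop cl 3 = 1 := le_antisymm hub hlb
    rw [this]; rfl
  · -- CT
    simp only [List.any_cons, List.any_nil, Bool.or_eq_true, Bool.or_false,
      PySem.Str.isIn_eq] at h1 h2 h3
    simp only [not_or] at h1 h2
    have hub : tzLoop cl 3 ≤ 2 := by
      rcases h3 with h | h | h | h | h | h
      · exact tzLoop_le_of_isIn cl ("chicago", 2) (by simp [kwRank]) (by decide) h 3
      · exact tzLoop_le_of_isIn cl ("houston", 2) (by simp [kwRank]) (by decide) h 3
      · exact tzLoop_le_of_isIn cl ("dallas", 2) (by simp [kwRank]) (by decide) h 3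
      · exact tzLoop_le_of_isIn cl ("kansas city", 2) (by simp [kwRank]) (by decide) h 3
      · exact tzLoop_le_of_isIn cl ("milwaukee", 2) (by simp [kwRank]) (by decide) h 3
      · exact tzLoop_le_of_isIn cl ("minneapolis", 2) (by simp [kwRank]) (by decide) h 3
    have hlb : 2 ≤ tzLoop cl 3 := by
      refine tzLoop_ge_of_notIn cl 2 (by omega) ?_
      intro p hp hlt
      fin_cases hp <;> simp_all
    have : tzLoop cl 3 = 2 := le_antisymm hub hlb
    rw [this]; rfl
  · -- ET
    simp only [List.any_cons, List.any_nil, Bool.or_eq_true, Bool.or_false,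
      PySem.Str.isIn_eq] at h1 h2 h3
    simp only [not_or] at h1 h2 h3
    have hlb : 3 ≤ tzLoop cl 3 := by
      refine tzLoop_ge_of_notIn cl 3 (le_refl 3) ?_
      intro p hp hlt
      fin_cases hp <;> simp_all
    have : tzLoop cl 3 = 3 := le_antisymm (tzLoop_le cl 3) hlb
    rw [this]; rfl
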